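-- pv_equiv track=rewrite | github.com/dkoh12/gamma | Python/dp/dp2.py | jobSchedule
-- ===== SOURCE A (Python) =====
-- def jobSchedule(jobs, weights):
-- 	arr = weights[:]
--
-- 	for i in range(1, len(jobs)):
-- 		for j in range(i):
-- 			curr = jobs[i]
-- 			compare = jobs[j]
--
-- 			if curr[0] >= compare[1]:
-- 				arr[i] = max(arr[i], arr[j] + weights[i])
--
-- 	return max(arr)
-- ===== SOURCE B (Python) =====
-- def _best_before(fr, x):
--     # largest chain value among frontier entries with finish time <= x (0 if none)
--     lo, hi = 0, len(fr)
--     while lo < hi: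
--         mid = (lo + hi) // 2
--         if fr[mid][0] <= x:
--             lo = mid + 1
--         else:
--             hi = mid
--     return fr[lo - 1][1] if lo else 0
--
-- def jobSchedule(jobs, weights):
--     best = list(weights)  # best[i]: max total weight of a compatible chain ending with job i
--     fr = []               # frontier of (finish, value) pairs, strictly increasing in both
--     for i, (s, e) in enumerate(jobs):
--         v = weights[i] + _best_before(fr, s)
--         best[i] = v
--         if v > _best_before(fr, e):
--             # insert (e, v), dropping entries it dominates
--             lo, hi = 0, len(fr)
--             while lo < hi:
--                 mid = (lo + hi) // 2
--                 if fr[mid][0] <= e - 1: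
--                     lo = mid + 1
--                 else:
--                     hi = mid
--             j = lo
--             while j < len(fr) and fr[j][1] <= v:
--                 j += 1
--             fr[lo:j] = [(e, v)]
--     return max(best)
-- ===== Notes on version B (the rewrite author's own statement) =====
-- stated objective: faster
-- what changed: Replaces A's O(n^2) all-pairs compatibility rescan with a single pass maintaining a monotone (finish_time, best_value) frontier queried and updated by binary search; Pre_ excludes inputs where A raises (empty weights, weights shorter than jobs) and, for the same length mismatch, the accidental cases where A's unguarded arr indexing happens not to be reached.
-- outside the precondition, e.g. on jobSchedule([(0, 1), (0, 5)], [3]): A returns 3, B raises IndexError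
import Mathlib
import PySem

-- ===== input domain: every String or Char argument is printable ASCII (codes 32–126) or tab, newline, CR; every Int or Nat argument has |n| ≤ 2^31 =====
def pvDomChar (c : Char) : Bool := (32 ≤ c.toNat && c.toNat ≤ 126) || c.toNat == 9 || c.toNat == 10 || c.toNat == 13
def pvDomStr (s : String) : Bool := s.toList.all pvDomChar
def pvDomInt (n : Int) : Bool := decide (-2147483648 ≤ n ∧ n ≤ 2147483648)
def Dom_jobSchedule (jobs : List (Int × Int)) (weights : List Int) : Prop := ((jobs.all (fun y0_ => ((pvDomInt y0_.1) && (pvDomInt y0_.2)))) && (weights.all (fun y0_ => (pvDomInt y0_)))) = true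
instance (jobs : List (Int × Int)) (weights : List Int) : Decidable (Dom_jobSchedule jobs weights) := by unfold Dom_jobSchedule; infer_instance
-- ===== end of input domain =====

-- B replaces A's O(n^2) nested compatibility scan by a single pass over a monotone
-- frontier of (finish, best-value) pairs queried by binary search.

-- ===== PORT A =====
def jobSchedule (jobs : List (Int × Int)) (weights : List Int) : Int :=
  let arr :=
    (PySem.List.pyRange 1 (jobs.length : Int) 1).foldl (fun arr i =>
      (PySem.List.pyRange 0 i 1).foldl (fun arr j =>
        let curr := PySem.List.pyGetD jobs i (0, 0)
        let compare := PySem.List.pyGetD jobs j (0, 0)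
        if curr.1 ≥ compare.2 then
          PySem.List.pySetD arr i
            (max (PySem.List.pyGetD arr i 0)
                 (PySem.List.pyGetD arr j 0 + PySem.List.pyGetD weights i 0))
        else arr) arr) weights
  (PySem.List.max? arr (fun y => y)).getD 0

-- ===== PORT B =====
-- the binary-search loop of _best_before / the insertion point search: first index in
-- [lo, hi) with fr[idx].1 > x (the fuel argument only bounds the recursion depth —
-- hi - lo halves each step, so any fuel ≥ hi - lo computes the loop exactly)
def pvUpperGo (fr : List (Int × Int)) (x : Int) : Nat → Nat → Nat → Nat
  | 0, lo, _hi => lo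
  | fuel + 1, lo, hi =>
    if lo < hi then
      let mid := (lo + hi) / 2
      if (fr.getD mid (0, 0)).1 ≤ x then pvUpperGo fr x fuel (mid + 1) hi
      else pvUpperGo fr x fuel lo mid
    else lo

def pvUpper (fr : List (Int × Int)) (x : Int) : Nat := pvUpperGo fr x fr.length 0 fr.length

-- helper _best_before
def pvQuery (fr : List (Int × Int)) (x : Int) : Int :=
  let i := pvUpper fr x
  if 0 < i then (fr.getD (i - 1) (0, 0)).2 else 0

-- the 'while j < len(fr) and fr[j][1] <= v: j += 1' loop (fuel-bounded, exact for
-- fuel ≥ fr.length - j)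
def pvSkipGo (fr : List (Int × Int)) (v : Int) : Nat → Nat → Nat
  | 0, j => j
  | fuel + 1, j =>
    if j < fr.length then
      (if (fr.getD j (0, 0)).2 ≤ v then pvSkipGo fr v fuel (j + 1) else j)
    else j

def pvSkip (fr : List (Int × Int)) (v : Int) (j : Nat) : Nat :=
  pvSkipGo fr v (fr.length - j) j

def jobSchedule_alt (jobs : List (Int × Int)) (weights : List Int) : Int :=
  let st :=
    (PySem.List.enumerate jobs 0).foldl (fun st p =>
      let i := p.1
      let s := p.2.1
      let e := p.2.2
      let fr := st.1
      let v := PySem.List.pyGetD weights i 0 + pvQuery fr s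
      let best := PySem.List.pySetD st.2 i v
      if pvQuery fr e < v then
        let lo := pvUpper fr (e - 1)
        let j := pvSkip fr v lo
        (fr.take lo ++ (e, v) :: fr.drop j, best)
      else (fr, best)) (([], weights) : List (Int × Int) × List Int)
  (PySem.List.max? st.2 (fun y => y)).getD 0

-- ===== PRECONDITION & SPEC =====
-- Pre_ excludes inputs where Python A raises (max([]) on empty weights; IndexError when
-- weights is shorter than jobs) — A happens to return when jobs outnumber weights but no
-- compatible pair reaches an out-of-range index, an accident of the guard, also excluded.
def Pre_jobSchedule (jobs : List (Int × Int)) (weights : List Int) : Prop :=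
  weights ≠ [] ∧ jobs.length ≤ weights.length
instance (jobs : List (Int × Int)) (weights : List Int) : Decidable (Pre_jobSchedule jobs weights) := by
  unfold Pre_jobSchedule; infer_instance

def pvWitness_jobSchedule : (List (Int × Int)) × List Int :=
  ([((0 : Int), (1 : Int)), ((1 : Int), (3 : Int))], [(2 : Int), (4 : Int)])

def Spec_jobSchedule (jobs : List (Int × Int)) (weights : List Int) (out : Int) : Prop := out = jobSchedule_alt jobs weights
instance (jobs : List (Int × Int)) (weights : List Int) (out : Int) : Decidable (Spec_jobSchedule jobs weights out) := by unfold Spec_jobSchedule; infer_instance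

-- ===== CLAIM (what is proved, stated in full; the proofs are below) =====
def Claim_equal_jobSchedule : Prop := ∀ (jobs : List (Int × Int)) (weights : List Int), Dom_jobSchedule jobs weights → Pre_jobSchedule jobs weights → Spec_jobSchedule jobs weights (jobSchedule jobs weights)


-- ===== LEMMAS AND PROOFS =====

-- best chain value among entries (finish, val) of L with finish ≤ x, floored at 0
def qspec (L : List (Int × Int)) (x : Int) : Int :=
  L.foldr (fun p acc => if p.1 ≤ x then max p.2 acc else acc) 0

-- the DP trace: pvDone i = [(finish_j, V_j) for j < i] newest first
def pvDone (jobs : List (Int × Int)) (ws : List Int) : Nat → List (Int × Int)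
  | 0 => []
  | i + 1 =>
      ((jobs.getD i (0, 0)).2,
        ws.getD i 0 + qspec (pvDone jobs ws i) (jobs.getD i (0, 0)).1) :: pvDone jobs ws i

def pvV (jobs : List (Int × Int)) (ws : List Int) (i : Nat) : Int :=
  ws.getD i 0 + qspec (pvDone jobs ws i) (jobs.getD i (0, 0)).1

-- frontier invariant: strictly increasing finishes and values, values positive
def frInv (fr : List (Int × Int)) : Prop :=
  (∀ p ∈ fr, 0 < p.2) ∧ fr.Pairwise (fun p q => p.1 < q.1 ∧ p.2 < q.2)

lemma qspec_cons (p : Int × Int) (L : List (Int × Int)) (x : Int) :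
    qspec (p :: L) x = if p.1 ≤ x then max p.2 (qspec L x) else qspec L x := rfl

lemma qspec_nonneg (L : List (Int × Int)) (x : Int) : 0 ≤ qspec L x := by
  induction L with
  | nil => simp [qspec]
  | cons p t ih =>
    rw [qspec_cons]
    split_ifs
    · exact le_trans ih (le_max_right _ _)
    · exact ih

lemma qspec_mono (L : List (Int × Int)) {x y : Int} (h : x ≤ y) : qspec L x ≤ qspec L y := by
  induction L with
  | nil => simp [qspec]
  | cons p t ih =>
    rw [qspec_cons, qspec_cons]
    split_ifs with h1 h2
    · exact max_le_max le_rfl ih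
    · exact absurd (le_trans h1 h) h2
    · exact le_trans ih (le_max_right _ _)
    · exact ih

lemma qspec_mem_le (L : List (Int × Int)) {p : Int × Int} (hp : p ∈ L) {x : Int}
    (hx : p.1 ≤ x) : p.2 ≤ qspec L x := by
  induction L with
  | nil => cases hp
  | cons q t ih =>
    rw [qspec_cons]
    rcases List.mem_cons.mp hp with h | h
    · subst h; rw [if_pos hx]; exact le_max_left _ _
    · split_ifs with h1
      · exact le_trans (ih h) (le_max_right _ _)
      · exact ih h

lemma qspec_le (L : List (Int × Int)) {x c : Int} (hc : 0 ≤ c)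
    (h : ∀ p ∈ L, p.1 ≤ x → p.2 ≤ c) : qspec L x ≤ c := by
  induction L with
  | nil => simpa [qspec] using hc
  | cons p t ih =>
    rw [qspec_cons]
    split_ifs with h1
    · exact max_le (h p (by simp) h1) (ih fun q hq => h q (List.mem_cons_of_mem _ hq))
    · exact ih fun q hq => h q (List.mem_cons_of_mem _ hq)

lemma pvUpperGo_spec (fr : List (Int × Int)) (x : Int)
    (hmono : ∀ a b : Nat, a ≤ b → b < fr.length → (fr.getD a (0,0)).1 ≤ (fr.getD b (0,0)).1) :
    ∀ (d lo hi : Nat), hi - lo ≤ d → lo ≤ hi → hi ≤ fr.length →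
    (∀ k, k < lo → (fr.getD k (0,0)).1 ≤ x) →
    (∀ k, hi ≤ k → k < fr.length → x < (fr.getD k (0,0)).1) →
    pvUpperGo fr x d lo hi ≤ fr.length ∧
      (∀ k, k < pvUpperGo fr x d lo hi → (fr.getD k (0,0)).1 ≤ x) ∧
      (∀ k, pvUpperGo fr x d lo hi ≤ k → k < fr.length → x < (fr.getD k (0,0)).1) := by
  intro d
  induction d with
  | zero =>
    intro lo hi hd hlh hhl hlo hhi
    simp only [pvUpperGo]
    exact ⟨by omega, fun k hk => hlo k hk, fun k hk1 hk2 => hhi k (by omega) hk2⟩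
  | succ d ih =>
    intro lo hi hd hlh hhl hlo hhi
    by_cases h : lo < hi
    · rw [show pvUpperGo fr x (d + 1) lo hi
          = if (fr.getD ((lo + hi) / 2) (0, 0)).1 ≤ x then pvUpperGo fr x d ((lo + hi) / 2 + 1) hi
            else pvUpperGo fr x d lo ((lo + hi) / 2) from by rw [pvUpperGo, if_pos h]]
      split_ifs with hc
      · exact ih ((lo + hi) / 2 + 1) hi (by omega) (by omega) hhl
          (fun k hk => le_trans (hmono k ((lo + hi) / 2) (by omega) (by omega)) hc) hhi
      · exact ih lo ((lo + hi) / 2) (by omega) (by omega) (by omega) hlo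
          (fun k hk1 hk2 => lt_of_lt_of_le (not_le.mp hc) (hmono ((lo + hi) / 2) k hk1 hk2))
    · rw [pvUpperGo, if_neg h]
      exact ⟨by omega, hlo, fun k hk => hhi k (by omega)⟩

lemma pvUpper_spec (fr : List (Int × Int)) (x : Int) (hinv : frInv fr) :
    pvUpper fr x ≤ fr.length ∧
      (∀ k, k < pvUpper fr x → (fr.getD k (0,0)).1 ≤ x) ∧
      (∀ k, pvUpper fr x ≤ k → k < fr.length → x < (fr.getD k (0,0)).1) := by
  have hmono : ∀ a b : Nat, a ≤ b → b < fr.length → (fr.getD a (0,0)).1 ≤ (fr.getD b (0,0)).1 := by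
    intro a b hab hb
    rcases Nat.eq_or_lt_of_le hab with rfl | hlt
    · exact le_rfl
    · have := List.pairwise_iff_getElem.mp hinv.2 a b (by omega) hb hlt
      rw [List.getD_eq_getElem _ _ (by omega : a < fr.length), List.getD_eq_getElem _ _ hb]
      exact le_of_lt this.1
  exact pvUpperGo_spec fr x hmono fr.length 0 fr.length (by omega) (by omega) le_rfl
    (fun k hk => absurd hk (Nat.not_lt_zero k)) (fun k h1 h2 => absurd h1 (by omega))

lemma pvSkipGo_spec (fr : List (Int × Int)) (v : Int) :
    ∀ (d j0 : Nat), fr.length - j0 ≤ d → j0 ≤ fr.length →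
    j0 ≤ pvSkipGo fr v d j0 ∧ pvSkipGo fr v d j0 ≤ fr.length ∧
      (∀ k, j0 ≤ k → k < pvSkipGo fr v d j0 → (fr.getD k (0,0)).2 ≤ v) ∧
      (pvSkipGo fr v d j0 < fr.length → v < (fr.getD (pvSkipGo fr v d j0) (0,0)).2) := by
  intro d
  induction d with
  | zero =>
    intro j0 hd hj
    simp only [pvSkipGo]
    exact ⟨le_rfl, by omega, fun k hk1 hk2 => absurd hk2 (by omega), fun h => absurd h (by omega)⟩
  | succ d ih =>
    intro j0 hd hj
    by_cases h : j0 < fr.length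
    · rw [pvSkipGo, if_pos h]
      split_ifs with hc
      · obtain ⟨ih1, ih2, ih3, ih4⟩ := ih (j0 + 1) (by omega) (by omega)
        refine ⟨by omega, ih2, ?_, ih4⟩
        intro k hk1 hk2
        rcases Nat.eq_or_lt_of_le hk1 with rfl | h2
        · exact hc
        · exact ih3 k h2 hk2
      · exact ⟨le_rfl, by omega, fun k hk1 hk2 => absurd hk2 (by omega),
          fun _ => not_le.mp hc⟩
    · rw [pvSkipGo, if_neg h]
      exact ⟨le_rfl, by omega, fun k hk1 hk2 => absurd hk2 (by omega), fun hh => absurd hh h⟩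

lemma pvSkip_spec (fr : List (Int × Int)) (v : Int) (j0 : Nat) (hj : j0 ≤ fr.length) :
    j0 ≤ pvSkip fr v j0 ∧ pvSkip fr v j0 ≤ fr.length ∧
      (∀ k, j0 ≤ k → k < pvSkip fr v j0 → (fr.getD k (0,0)).2 ≤ v) ∧
      (pvSkip fr v j0 < fr.length → v < (fr.getD (pvSkip fr v j0) (0,0)).2) := by
  unfold pvSkip
  exact pvSkipGo_spec fr v (fr.length - j0) j0 (by omega) hj

lemma pvQuery_eq_qspec (fr : List (Int × Int)) (x : Int) (hinv : frInv fr) :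
    pvQuery fr x = qspec fr x := by
  obtain ⟨hlen, hlo, hhi⟩ := pvUpper_spec fr x hinv
  unfold pvQuery
  dsimp only
  by_cases h : 0 < pvUpper fr x
  · rw [if_pos h]
    have hr1 : pvUpper fr x - 1 < fr.length := by omega
    have hmem : fr.getD (pvUpper fr x - 1) (0,0) ∈ fr := by
      rw [List.getD_eq_getElem _ _ hr1]; exact List.getElem_mem hr1
    apply le_antisymm
    · exact qspec_mem_le fr hmem (hlo (pvUpper fr x - 1) (by omega))
    · apply qspec_le fr (le_of_lt (hinv.1 _ hmem))
      intro p hp hpx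
      obtain ⟨k, hk, hpk⟩ := List.mem_iff_getElem.mp hp
      by_cases hkr : k < pvUpper fr x
      · rcases Nat.lt_or_ge k (pvUpper fr x - 1) with h2 | h2
        · have h3 := (List.pairwise_iff_getElem.mp hinv.2 k (pvUpper fr x - 1) hk hr1 h2).2
          rw [List.getD_eq_getElem _ _ hr1, ← hpk]
          exact le_of_lt h3
        · have h4 : k = pvUpper fr x - 1 := by omega
          subst h4
          rw [List.getD_eq_getElem _ _ hr1, ← hpk]
      · exfalso
        have h5 := hhi k (by omega) hk
        rw [List.getD_eq_getElem _ _ hk, hpk] at h5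
        exact absurd hpx (not_le.mpr h5)
  · rw [if_neg h]
    symm
    apply le_antisymm _ (qspec_nonneg fr x)
    apply qspec_le fr le_rfl
    intro p hp hpx
    obtain ⟨k, hk, hpk⟩ := List.mem_iff_getElem.mp hp
    have h5 := hhi k (by omega) hk
    rw [List.getD_eq_getElem _ _ hk, hpk] at h5
    exact absurd hpx (not_le.mpr h5)

lemma insert_spec (fr : List (Int × Int)) (e v : Int) (hinv : frInv fr) (hv : qspec fr e < v) :
    frInv (fr.take (pvUpper fr (e-1)) ++ (e, v) :: fr.drop (pvSkip fr v (pvUpper fr (e-1)))) ∧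
      ∀ x, qspec (fr.take (pvUpper fr (e-1)) ++ (e, v) :: fr.drop (pvSkip fr v (pvUpper fr (e-1)))) x
            = qspec ((e, v) :: fr) x := by
  obtain ⟨hulen, hulo, huhi⟩ := pvUpper_spec fr (e-1) hinv
  obtain ⟨hs0, hslen, hsmid, hstop⟩ := pvSkip_spec fr v (pvUpper fr (e-1)) hulen
  set idx := pvUpper fr (e-1) with hidx
  set j := pvSkip fr v idx with hj
  have hIdx : ∀ (a b : Nat) (ha : a < fr.length) (hb : b < fr.length), a < b →
      fr[a].1 < fr[b].1 ∧ fr[a].2 < fr[b].2 := fun a b ha hb hab =>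
    List.pairwise_iff_getElem.mp hinv.2 a b ha hb hab
  have hlt_e : ∀ (k : Nat) (hk : k < fr.length), k < idx → fr[k].1 < e := by
    intro k hk h; have h2 := hulo k h; rw [List.getD_eq_getElem _ _ hk] at h2; omega
  have hge_e : ∀ (k : Nat) (hk : k < fr.length), idx ≤ k → e ≤ fr[k].1 := by
    intro k hk h; have h2 := huhi k h hk; rw [List.getD_eq_getElem _ _ hk] at h2; omega
  have hmid_le : ∀ (k : Nat) (hk : k < fr.length), idx ≤ k → k < j → fr[k].2 ≤ v := by
    intro k hk h1 h2; have h3 := hsmid k h1 h2; rwa [List.getD_eq_getElem _ _ hk] at h3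
  have hsuf_gt : ∀ (k : Nat) (hk : k < fr.length), j ≤ k → v < fr[k].2 := by
    intro k hk h1
    have hjlen : j < fr.length := lt_of_le_of_lt h1 hk
    have h0 : v < fr[j].2 := by
      have h2 := hstop hjlen; rwa [List.getD_eq_getElem _ _ hjlen] at h2
    rcases Nat.eq_or_lt_of_le h1 with rfl | h2
    · exact h0
    · exact lt_trans h0 (hIdx j k hjlen hk h2).2
  have hsuf_e : ∀ (k : Nat) (hk : k < fr.length), j ≤ k → e < fr[k].1 := by
    intro k hk h1
    have h2 : e ≤ fr[k].1 := hge_e k hk (le_trans hs0 h1)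
    rcases lt_or_eq_of_le h2 with h3 | h3
    · exact h3
    · exfalso
      have hm : fr[k] ∈ fr := List.getElem_mem hk
      have h4 : fr[k].2 ≤ qspec fr e := qspec_mem_le fr hm (le_of_eq h3.symm)
      have h5 := hsuf_gt k hk h1
      omega
  have hpre_v : ∀ (k : Nat) (hk : k < fr.length), k < idx → fr[k].2 < v := by
    intro k hk h
    have hm : fr[k] ∈ fr := List.getElem_mem hk
    have h1 : fr[k].1 ≤ e := le_of_lt (hlt_e k hk h)
    have h2 := qspec_mem_le fr hm h1
    omega
  have hmem_take : ∀ p ∈ fr.take idx, ∃ (k : Nat) (hk : k < fr.length), k < idx ∧ fr[k] = p := by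
    intro p hp
    obtain ⟨k, hk, hpk⟩ := List.mem_iff_getElem.mp hp
    have hk2 : k < idx := by simp [List.length_take] at hk; omega
    have hk3 : k < fr.length := by omega
    exact ⟨k, hk3, hk2, by rw [← hpk]; exact List.getElem_take.symm⟩
  have hmem_drop : ∀ p ∈ fr.drop j, ∃ (k : Nat) (hk : k < fr.length), j ≤ k ∧ fr[k] = p := by
    intro p hp
    obtain ⟨k, hk, hpk⟩ := List.mem_iff_getElem.mp hp
    have hk2 : j + k < fr.length := by simp [List.length_drop] at hk; omega
    refine ⟨j + k, hk2, by omega, ?_⟩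
    rw [← hpk, List.getElem_drop]
  have htake_mem : ∀ (k : Nat) (hk : k < fr.length), k < idx → fr[k] ∈ fr.take idx := by
    intro k hk h
    rw [List.mem_iff_getElem]
    exact ⟨k, by simp [List.length_take]; omega, List.getElem_take⟩
  have hdrop_mem : ∀ (k : Nat) (hk : k < fr.length), j ≤ k → fr[k] ∈ fr.drop j := by
    intro k hk h
    rw [List.mem_iff_getElem]
    refine ⟨k - j, by simp [List.length_drop]; omega, ?_⟩
    rw [List.getElem_drop]
    simp only [show j + (k - j) = k from by omega]
  constructor
  · constructor
    · intro p hp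
      rcases List.mem_append.mp hp with h | h
      · exact hinv.1 p (List.mem_of_mem_take h)
      · rcases List.mem_cons.mp h with rfl | h2
        · have h0 := qspec_nonneg fr e
          show (0:Int) < v
          omega
        · exact hinv.1 p (List.mem_of_mem_drop h2)
    · rw [List.pairwise_append]
      refine ⟨hinv.2.sublist (List.take_sublist _ _), ?_, ?_⟩
      · rw [List.pairwise_cons]
        refine ⟨?_, hinv.2.sublist (List.drop_sublist _ _)⟩
        intro q hq
        obtain ⟨k, hk, hk2, hpk⟩ := hmem_drop q hq
        rw [← hpk]
        exact ⟨hsuf_e k hk hk2, hsuf_gt k hk hk2⟩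
      · intro p hp q hq
        obtain ⟨a, ha, ha2, hpa⟩ := hmem_take p hp
        rcases List.mem_cons.mp hq with rfl | hq2
        · rw [← hpa]; exact ⟨hlt_e a ha ha2, hpre_v a ha ha2⟩
        · obtain ⟨b, hb, hb2, hqb⟩ := hmem_drop q hq2
          rw [← hpa, ← hqb]
          exact hIdx a b ha hb (by omega)
  · intro x
    have hev_mem : (e, v) ∈ fr.take idx ++ (e, v) :: fr.drop j :=
      List.mem_append_right _ (by simp)
    apply le_antisymm
    · apply qspec_le _ (qspec_nonneg _ x)
      intro p hp hpx
      rcases List.mem_append.mp hp with h | h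
      · exact qspec_mem_le _ (List.mem_cons_of_mem _ (List.mem_of_mem_take h)) hpx
      · rcases List.mem_cons.mp h with rfl | h2
        · exact qspec_mem_le _ (by simp) hpx
        · exact qspec_mem_le _ (List.mem_cons_of_mem _ (List.mem_of_mem_drop h2)) hpx
    · apply qspec_le _ (qspec_nonneg _ x)
      intro p hp hpx
      rcases List.mem_cons.mp hp with rfl | h2
      · exact qspec_mem_le _ hev_mem hpx
      · obtain ⟨k, hk, hpk⟩ := List.mem_iff_getElem.mp h2
        by_cases hka : k < idx
        · exact qspec_mem_le _ (List.mem_append_left _ (by rw [← hpk]; exact htake_mem k hk hka)) hpx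
        · by_cases hkb : j ≤ k
          · exact qspec_mem_le _
              (List.mem_append_right _ (List.mem_cons_of_mem _ (by rw [← hpk]; exact hdrop_mem k hk hkb))) hpx
          · have h3 : p.2 ≤ v := by rw [← hpk]; exact hmid_le k hk (by omega) (by omega)
            have h4 : e ≤ p.1 := by rw [← hpk]; exact hge_e k hk (by omega)
            have h5 : v ≤ qspec (fr.take idx ++ (e, v) :: fr.drop j) x :=
              qspec_mem_le _ hev_mem (le_trans h4 hpx)
            omega

-- B's loop body over Nat indices (the port's body after index-cast normalisation)
def bVal (jobs : List (Int × Int)) (weights : List Int) (fr : List (Int × Int)) (k : Nat) : Int :=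
  weights.getD k 0 + pvQuery fr (jobs.getD k (0, 0)).1

def bStep (jobs : List (Int × Int)) (weights : List Int)
    (st : List (Int × Int) × List Int) (k : Nat) : List (Int × Int) × List Int :=
  if pvQuery st.1 (jobs.getD k (0, 0)).2 < bVal jobs weights st.1 k then
    (st.1.take (pvUpper st.1 ((jobs.getD k (0, 0)).2 - 1)) ++
        ((jobs.getD k (0, 0)).2, bVal jobs weights st.1 k) ::
          st.1.drop (pvSkip st.1 (bVal jobs weights st.1 k) (pvUpper st.1 ((jobs.getD k (0, 0)).2 - 1))),
      st.2.set k (bVal jobs weights st.1 k))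
  else (st.1, st.2.set k (bVal jobs weights st.1 k))

lemma B_invariant (jobs : List (Int × Int)) (weights : List Int)
    (hlen : jobs.length ≤ weights.length) (t : Nat) (ht : t ≤ jobs.length) :
    ((List.range t).foldl (bStep jobs weights) ([], weights)).2
        = (List.range t).map (pvV jobs weights) ++ weights.drop t ∧
    frInv ((List.range t).foldl (bStep jobs weights) ([], weights)).1 ∧
    ∀ x, qspec ((List.range t).foldl (bStep jobs weights) ([], weights)).1 x
          = qspec (pvDone jobs weights t) x := by
  induction t with
  | zero =>
    refine ⟨by simp, ?_, fun x => by simp [pvDone]⟩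
    simp only [List.range_zero, List.foldl_nil]
    exact ⟨fun p hp => by simp at hp, List.Pairwise.nil⟩
  | succ t ih =>
    obtain ⟨ihv, ihf, ihq⟩ := ih (by omega)
    rw [List.range_succ, List.foldl_append, List.foldl_cons, List.foldl_nil]
    set st := (List.range t).foldl (bStep jobs weights) ([], weights) with hst
    have htw : t < weights.length := by omega
    have hvv : bVal jobs weights st.1 t = pvV jobs weights t := by
      unfold bVal pvV
      rw [pvQuery_eq_qspec _ _ ihf, ihq]
    have hD : pvDone jobs weights (t + 1) =
        ((jobs.getD t (0, 0)).2, pvV jobs weights t) :: pvDone jobs weights t := rfl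
    have hlenpre : ((List.range t).map (pvV jobs weights)).length = t := by simp
    have hset : st.2.set t (bVal jobs weights st.1 t)
        = (List.range (t + 1)).map (pvV jobs weights) ++ weights.drop (t + 1) := by
      rw [ihv, hvv, List.set_append, if_neg (by rw [hlenpre]; omega), hlenpre, Nat.sub_self]
      rw [← List.getElem_cons_drop htw, List.set_cons_zero]
      simp [List.range_succ, List.map_append, List.append_assoc]
    by_cases hb : pvQuery st.1 (jobs.getD t (0, 0)).2 < bVal jobs weights st.1 t
    · rw [bStep, if_pos hb]
      have hv2 : qspec st.1 (jobs.getD t (0, 0)).2 < bVal jobs weights st.1 t := by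
        rw [← pvQuery_eq_qspec _ _ ihf]; exact hb
      obtain ⟨hfi, hqi⟩ := insert_spec st.1 (jobs.getD t (0, 0)).2 (bVal jobs weights st.1 t) ihf hv2
      refine ⟨by rw [List.range_succ] at hset; exact hset, hfi, ?_⟩
      intro x
      show qspec _ x = _
      rw [hqi x, qspec_cons, hD, qspec_cons, ihq x, hvv]
    · rw [bStep, if_neg hb]
      refine ⟨by rw [List.range_succ] at hset; exact hset, ihf, ?_⟩
      intro x
      show qspec st.1 x = _
      rw [hD, qspec_cons, ← ihq x]
      split_ifs with hex
      · have h1 : bVal jobs weights st.1 t ≤ qspec st.1 (jobs.getD t (0, 0)).2 := by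
          rw [← pvQuery_eq_qspec _ _ ihf]; exact not_lt.mp hb
        rw [hvv] at h1
        have h2 : qspec st.1 (jobs.getD t (0, 0)).2 ≤ qspec st.1 x := qspec_mono _ hex
        omega
      · rfl

lemma B_eq (jobs : List (Int × Int)) (weights : List Int) (hlen : jobs.length ≤ weights.length) :
    jobSchedule_alt jobs weights =
      (PySem.List.max? (((List.range jobs.length).map (pvV jobs weights)) ++ weights.drop jobs.length)
        (fun y => y)).getD 0 := by
  unfold jobSchedule_alt
  rw [PySem.List.enumerate_eq_map_pyRange (d := ((0 : Int), (0 : Int))), List.foldl_map]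
  simp only [PySem.List.len_eq]
  rw [PySem.List.pyRange_zero_nat, List.foldl_map]
  have hfun : (fun (st : List (Int × Int) × List Int) (k : Nat) =>
      (fun st (p : Int × (Int × Int)) =>
        let i := p.1
        let s := p.2.1
        let e := p.2.2
        let fr := st.1
        let v := PySem.List.pyGetD weights i 0 + pvQuery fr s
        let best := PySem.List.pySetD st.2 i v
        if pvQuery fr e < v then
          let lo := pvUpper fr (e - 1)
          let j := pvSkip fr v lo
          (fr.take lo ++ (e, v) :: fr.drop j, best)
        else (fr, best)) st ((k : Int), PySem.List.pyGetD jobs (k : Int) (0, 0)))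
      = bStep jobs weights := by
    funext st k
    simp only [PySem.List.pyGetD_natCast, PySem.List.pySetD_natCast, bStep, bVal]
  rw [hfun]
  show (PySem.List.max? ((List.foldl (bStep jobs weights) ([], weights) (List.range jobs.length)).2)
      fun y => y).getD 0 = _
  rw [(B_invariant jobs weights hlen jobs.length le_rfl).1]

-- A's outer-loop body over Nat indices
def aStep (jobs : List (Int × Int)) (weights : List Int) (arr : List Int) (k : Nat) : List Int :=
  (List.range (k + 1)).foldl (fun arr j =>
    if (jobs.getD (k + 1) (0, 0)).1 ≥ (jobs.getD j (0, 0)).2 then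
      arr.set (k + 1) (max (arr.getD (k + 1) 0) (arr.getD j 0 + weights.getD (k + 1) 0))
    else arr) arr

lemma writeOne (jobs : List (Int × Int)) (weights : List Int) (i : Nat) (L : List Nat)
    (arr : List Int) (hL : ∀ j ∈ L, j ≠ i) (hi : i < arr.length) :
    L.foldl (fun arr j =>
        if (jobs.getD i (0,0)).1 ≥ (jobs.getD j (0,0)).2 then
          arr.set i (max (arr.getD i 0) (arr.getD j 0 + weights.getD i 0))
        else arr) arr
    = arr.set i (L.foldl (fun acc j =>
        if (jobs.getD i (0,0)).1 ≥ (jobs.getD j (0,0)).2 then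
          max acc (arr.getD j 0 + weights.getD i 0)
        else acc) (arr.getD i 0)) := by
  induction L generalizing arr with
  | nil =>
    simp only [List.foldl_nil]
    rw [List.getD_eq_getElem _ _ hi, List.set_getElem_self]
  | cons j L ihL =>
    have hji : j ≠ i := hL j (by simp)
    rw [List.foldl_cons, List.foldl_cons]
    by_cases hc : (jobs.getD i (0,0)).1 ≥ (jobs.getD j (0,0)).2
    · rw [if_pos hc, if_pos hc]
      rw [ihL (arr.set i (max (arr.getD i 0) (arr.getD j 0 + weights.getD i 0)))
        (fun a ha => hL a (List.mem_cons_of_mem _ ha)) (by rw [List.length_set]; exact hi)]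
      rw [List.set_set]
      congr 1
      have h1 : (arr.set i (max (arr.getD i 0) (arr.getD j 0 + weights.getD i 0))).getD i 0
          = max (arr.getD i 0) (arr.getD j 0 + weights.getD i 0) := by
        rw [List.getD_eq_getElem _ _ (by rw [List.length_set]; exact hi), List.getElem_set_self]
      rw [h1]
      apply PySem.List.foldl_congr_mem
      intro acc a ha
      have hai : a ≠ i := hL a (List.mem_cons_of_mem _ ha)
      have h2 : (arr.set i (max (arr.getD i 0) (arr.getD j 0 + weights.getD i 0))).getD a 0
          = arr.getD a 0 := by
        by_cases hlen : a < arr.length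
        · rw [List.getD_eq_getElem _ _ (by rw [List.length_set]; exact hlen),
            List.getD_eq_getElem _ _ hlen, List.getElem_set_ne (fun hh => hai hh.symm)]
        · rw [List.getD_eq_default _ _ (by rw [List.length_set]; omega),
            List.getD_eq_default _ _ (by omega)]
      rw [h2]
    · rw [if_neg hc, if_neg hc]
      exact ihL arr (fun a ha => hL a (List.mem_cons_of_mem _ ha)) hi

lemma accFold (jobs : List (Int × Int)) (weights : List Int) (m : Nat) (s w : Int) :
    (List.range m).foldl (fun acc j =>
        if s ≥ (jobs.getD j (0,0)).2 then max acc (pvV jobs weights j + w) else acc) w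
    = w + qspec (pvDone jobs weights m) s := by
  induction m with
  | zero => simp [List.range_zero, List.foldl_nil, pvDone, qspec]
  | succ m ih =>
    rw [List.range_succ, List.foldl_append, List.foldl_cons, List.foldl_nil, ih]
    rw [show pvDone jobs weights (m + 1)
        = ((jobs.getD m (0,0)).2, pvV jobs weights m) :: pvDone jobs weights m from rfl,
      qspec_cons]
    simp only [ge_iff_le]
    split_ifs with h
    · rw [add_comm (pvV jobs weights m) w, ← max_add_add_left, max_comm]
    · rfl

lemma A_outer (jobs : List (Int × Int)) (weights : List Int) (h2 : jobs.length ≤ weights.length) :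
    ∀ t, t < jobs.length →
      (List.range t).foldl (aStep jobs weights) weights
        = (List.range (t + 1)).map (pvV jobs weights) ++ weights.drop (t + 1) := by
  intro t
  induction t with
  | zero =>
    intro ht
    have h0 : 0 < weights.length := by omega
    simp only [List.range_zero, List.foldl_nil]
    have hv0 : pvV jobs weights 0 = weights.getD 0 0 := by
      unfold pvV
      simp [pvDone, qspec]
    rw [show List.range 1 = [0] from rfl]
    simp only [List.map_cons, List.map_nil, hv0]
    rw [List.getD_eq_getElem _ _ h0]
    rw [show ([weights[0]] : List Int) ++ weights.drop 1 = weights[0] :: weights.drop 1 from rfl]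
    rw [List.getElem_cons_drop h0, List.drop_zero]
  | succ t iht =>
    intro ht
    have htw : t + 1 < weights.length := by omega
    rw [List.range_succ, List.foldl_append, List.foldl_cons, List.foldl_nil, iht (by omega)]
    set A := (List.range (t + 1)).map (pvV jobs weights) ++ weights.drop (t + 1) with hA
    have hlenpre : ((List.range (t + 1)).map (pvV jobs weights)).length = t + 1 := by
      simp
    have hlenA : A.length = weights.length := by
      rw [hA, List.length_append, hlenpre, List.length_drop]; omega
    have hi : t + 1 < A.length := by omega
    unfold aStep
    rw [writeOne jobs weights (t + 1) (List.range (t + 1)) A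
      (fun j hj => by have := List.mem_range.mp hj; omega) hi]
    have hstart : A.getD (t + 1) 0 = weights.getD (t + 1) 0 := by
      rw [hA, List.getD_append_right _ _ _ _ (by rw [hlenpre])]
      rw [hlenpre, Nat.sub_self]
      rw [← List.getElem_cons_drop htw]
      rw [show ((weights[t+1] :: weights.drop (t + 1 + 1)).getD 0 0) = weights[t+1] from rfl]
      rw [List.getD_eq_getElem _ _ htw]
    have hread : ∀ j, j < t + 1 → A.getD j 0 = pvV jobs weights j := by
      intro j hj
      rw [hA, List.getD_append _ _ _ _ (by rw [hlenpre]; omega),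
        PySem.List.getD_map_range _ _ _ _ hj]
    rw [hstart]
    rw [PySem.List.foldl_congr_mem _ _
      (fun acc j => if (jobs.getD (t + 1) (0,0)).1 ≥ (jobs.getD j (0,0)).2 then
          max acc (pvV jobs weights j + weights.getD (t + 1) 0) else acc) _
      (fun acc j hj => by rw [hread j (List.mem_range.mp hj)])]
    rw [accFold jobs weights (t + 1) ((jobs.getD (t + 1) (0,0)).1) (weights.getD (t + 1) 0)]
    rw [show weights.getD (t + 1) 0 + qspec (pvDone jobs weights (t + 1)) ((jobs.getD (t + 1) (0,0)).1)
        = pvV jobs weights (t + 1) from rfl]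
    rw [hA, List.set_append, if_neg (by rw [hlenpre]; omega), hlenpre, Nat.sub_self]
    rw [← List.getElem_cons_drop htw, List.set_cons_zero]
    simp [List.range_succ, List.map_append, List.append_assoc]

lemma A_eq (jobs : List (Int × Int)) (weights : List Int) (_h1 : weights ≠ [])
    (h2 : jobs.length ≤ weights.length) :
    jobSchedule jobs weights =
      (PySem.List.max? (((List.range jobs.length).map (pvV jobs weights)) ++ weights.drop jobs.length)
        (fun y => y)).getD 0 := by
  unfold jobSchedule
  rcases Nat.eq_zero_or_pos jobs.length with hn | hn
  · rw [hn]
    simp [PySem.List.pyRange_one]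
  · rw [PySem.List.pyRange_one 1 (jobs.length : Int), List.foldl_map]
    have hcast : (((jobs.length : Int)) - 1).toNat = jobs.length - 1 := by omega
    rw [hcast]
    have hstep : ∀ (arr : List Int) (k : Nat),
        (PySem.List.pyRange 0 (1 + (k : Int)) 1).foldl (fun arr j =>
          let curr := PySem.List.pyGetD jobs (1 + (k : Int)) (0, 0)
          let compare := PySem.List.pyGetD jobs j (0, 0)
          if curr.1 ≥ compare.2 then
            PySem.List.pySetD arr (1 + (k : Int))
              (max (PySem.List.pyGetD arr (1 + (k : Int)) 0)
                   (PySem.List.pyGetD arr j 0 + PySem.List.pyGetD weights (1 + (k : Int)) 0))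
          else arr) arr = aStep jobs weights arr k := by
      intro arr k
      have hck : (1 : Int) + (k : Int) = ((k + 1 : Nat) : Int) := by push_cast; ring
      rw [hck, PySem.List.pyRange_zero_nat, List.foldl_map]
      unfold aStep
      apply PySem.List.foldl_congr_mem
      intro acc j hj
      simp only [PySem.List.pyGetD_natCast, PySem.List.pySetD_natCast]
    rw [PySem.List.foldl_congr_mem _ _ (aStep jobs weights) _ (fun arr k _ => hstep arr k)]
    rw [A_outer jobs weights h2 (jobs.length - 1) (by omega)]
    rw [show jobs.length - 1 + 1 = jobs.length from by omega]

-- ===== VERDICT (by name: the statement is the Claim_ definition above) =====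
theorem jobSchedule_spec : Claim_equal_jobSchedule := by
  intro jobs weights _hD hP
  unfold Spec_jobSchedule
  rw [A_eq jobs weights hP.1 hP.2, B_eq jobs weights hP.2]
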